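-- pv_equiv track=rewrite | github.com/ichim748/PythonHomeworks | PythonLab2/main.py | spectators_that_cant_see
-- ===== SOURCE A (Python) =====
-- def spectators_that_cant_see(matrix):
--     final_output = []
--     for i in range(len(matrix)):
--         for j in range(len(matrix[i])):
--             for t in range(i-1, -1, -1):
--                 if matrix[t][j] >= matrix[i][j]:
--                     final_output.append([i, j])
--                     break
--     return final_output
-- ===== SOURCE B (Python) =====
-- def spectators_that_cant_see(matrix):
--     col_max = {}
--     result = []
--     for i, row in enumerate(matrix):
--         for j, h in enumerate(row):
--             if j in col_max and col_max[j] >= h: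
--                 result.append([i, j])
--             col_max[j] = max(col_max.get(j, h), h)
--     return result
-- ===== Notes on version B (the rewrite author's own statement) =====
-- stated objective: faster
-- what changed: Replaced the backwards rescan of all earlier rows for every cell by a single row-by-row sweep that keeps the running maximum height of each column in a dict.
import Mathlib
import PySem

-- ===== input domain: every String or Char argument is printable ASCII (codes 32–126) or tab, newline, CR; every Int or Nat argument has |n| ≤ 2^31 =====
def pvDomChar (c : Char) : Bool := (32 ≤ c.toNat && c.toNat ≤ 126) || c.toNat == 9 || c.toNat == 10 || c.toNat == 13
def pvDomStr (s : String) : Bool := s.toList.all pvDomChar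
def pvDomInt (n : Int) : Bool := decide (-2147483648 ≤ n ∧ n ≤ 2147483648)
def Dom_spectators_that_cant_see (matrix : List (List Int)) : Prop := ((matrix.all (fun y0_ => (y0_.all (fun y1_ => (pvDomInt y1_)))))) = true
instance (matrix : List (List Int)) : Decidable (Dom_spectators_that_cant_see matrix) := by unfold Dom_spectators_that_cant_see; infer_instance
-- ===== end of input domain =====

-- B replaces A's backwards rescan of all earlier rows (O(rows^2·cols)) by one running
-- per-column maximum kept in a dict while scanning the rows once (O(rows·cols)).

-- ===== PORT A =====
-- inner 'for t in range(i-1, -1, -1): if matrix[t][j] >= matrix[i][j]: … break'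
-- (the break becomes an early-return recursion over the descending index list;
--  indices i, j, t are the nonnegative ints produced by range, ported as Nat;
--  matrix[t][j] is ported with getD — Pre_ excludes exactly the inputs where
--  Python's matrix[t][j] would raise IndexError, so the default is never reached there)
def pvScanA (matrix : List (List Int)) (v : Int) (j : Nat) : List Nat → Bool
  | [] => false
  | t :: ts => if v ≤ (matrix.getD t []).getD j 0 then true else pvScanA matrix v j ts

def spectators_that_cant_see (matrix : List (List Int)) : List (List Int) :=
  (List.range matrix.length).foldl (fun acc i =>
    (List.range (matrix.getD i []).length).foldl (fun acc j =>
      if pvScanA matrix ((matrix.getD i []).getD j 0) j ((List.range i).reverse)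
      then acc ++ [[(i : Int), (j : Int)]] else acc) acc) []

-- ===== PORT B =====
-- state = (col_max dict, result); one step of the inner 'for j, h in enumerate(row)'
-- (enumerate indices are the nonnegative ints 0,1,…, ported as Nat via zipIdx — exact here)
def pvStepB (i : Nat) (st : PySem.Dict Nat Int × List (List Int)) (q : Int × Nat) :
    PySem.Dict Nat Int × List (List Int) :=
  let h := q.1
  let j := q.2
  let res := if st.1.contains j && decide (h ≤ st.1.getD j 0) then
      st.2 ++ [[(i : Int), (j : Int)]]
    else st.2
  (st.1.insert j (max (st.1.getD j h) h), res)

def spectators_that_cant_see_alt (matrix : List (List Int)) : List (List Int) :=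
  (matrix.zipIdx.foldl (fun st p => p.1.zipIdx.foldl (pvStepB p.2) st)
    (PySem.Dict.empty, [])).2

-- ===== PRECONDITION & SPEC =====
-- Pre_ excludes exactly the inputs on which A raises IndexError: some cell (i, j)
-- whose backwards scan reaches an earlier row shorter than j+1 before any blocking match.
def Pre_spectators_that_cant_see (matrix : List (List Int)) : Prop :=
  ∀ i < matrix.length, ∀ j < (matrix.getD i []).length, ∀ t < i,
    j < (matrix.getD t []).length ∨
    ∃ t' < i, t < t' ∧ j < (matrix.getD t' []).length ∧
      (matrix.getD i []).getD j 0 ≤ (matrix.getD t' []).getD j 0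

instance (matrix : List (List Int)) : Decidable (Pre_spectators_that_cant_see matrix) := by
  unfold Pre_spectators_that_cant_see; infer_instance

def pvWitness_spectators_that_cant_see : List (List Int) := [[3, 1, 4], [2, 5], [2]]

def Spec_spectators_that_cant_see (matrix : List (List Int)) (out : List (List Int)) : Prop :=
  out = spectators_that_cant_see_alt matrix
instance (matrix : List (List Int)) (out : List (List Int)) : Decidable (Spec_spectators_that_cant_see matrix out) := by
  unfold Spec_spectators_that_cant_see; infer_instance

-- ===== CLAIM (what is proved, stated in full; the proofs are below) =====
def Claim_equal_spectators_that_cant_see : Prop :=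
  ∀ (matrix : List (List Int)), Dom_spectators_that_cant_see matrix →
    Pre_spectators_that_cant_see matrix →
    Spec_spectators_that_cant_see matrix (spectators_that_cant_see matrix)

-- ===== LEMMAS AND PROOFS =====

-- common reference form: cell (i, j) is blocked iff some earlier row reaches column j
-- with a height ≥ the spectator's
def pvBlockedB (m : List (List Int)) (i j : Nat) : Bool :=
  decide (∃ t < i, j < (m.getD t []).length ∧
    (m.getD i []).getD j 0 ≤ (m.getD t []).getD j 0)

def pvF (m : List (List Int)) : List (List Int) :=
  (List.range m.length).flatMap (fun i =>
    ((List.range (m.getD i []).length).filter (fun j => pvBlockedB m i j)).map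
      (fun (j : Nat) => [(i : Int), (j : Int)]))

-- the dict check 'j in col_max and col_max[j] >= h'
def pvQ (cm : PySem.Dict Nat Int) (j : Nat) (h0 : Int) : Bool :=
  cm.contains j && decide (h0 ≤ cm.getD j 0)

-- ---- A side ----

lemma pvScanA_iff (m : List (List Int)) (v : Int) (j : Nat) (ts : List Nat) :
    pvScanA m v j ts = true ↔ ∃ t ∈ ts, v ≤ (m.getD t []).getD j 0 := by
  induction ts with
  | nil => simp [pvScanA]
  | cons t ts ih =>
      simp only [pvScanA]
      split_ifs with h
      · exact iff_of_true rfl ⟨t, List.mem_cons_self .., h⟩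
      · rw [ih]
        constructor
        · rintro ⟨u, hu, hv⟩; exact ⟨u, List.mem_cons_of_mem _ hu, hv⟩
        · rintro ⟨u, hu, hv⟩
          rcases List.mem_cons.mp hu with rfl | hu
          · exact absurd hv h
          · exact ⟨u, hu, hv⟩

lemma pvScanA_eq_blocked (m : List (List Int))
    (hpre : Pre_spectators_that_cant_see m) (i j : Nat)
    (hi : i < m.length) (hj : j < (m.getD i []).length) :
    pvScanA m ((m.getD i []).getD j 0) j ((List.range i).reverse) = pvBlockedB m i j := by
  rw [Bool.eq_iff_iff, pvScanA_iff]
  simp only [pvBlockedB, decide_eq_true_eq, List.mem_reverse, List.mem_range]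
  constructor
  · rintro ⟨t, ht, hv⟩
    by_cases hlen : j < (m.getD t []).length
    · exact ⟨t, ht, hlen, hv⟩
    · rcases (hpre i hi j hj t ht).resolve_left hlen with ⟨t', ht', _, hlen', hv'⟩
      exact ⟨t', ht', hlen', hv'⟩
  · rintro ⟨t, ht, _, hv⟩
    exact ⟨t, ht, hv⟩

lemma pvA_eq_pvF (m : List (List Int)) (hpre : Pre_spectators_that_cant_see m) :
    spectators_that_cant_see m = pvF m := by
  unfold spectators_that_cant_see pvF
  simp only [PySem.List.foldl_append_if, PySem.List.foldl_append_eq_flatMap,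
    List.nil_append]
  refine List.flatMap_congr (fun i hi => ?_)
  have h : ∀ j ∈ List.range (m.getD i []).length,
      pvScanA m ((m.getD i []).getD j 0) j ((List.range i).reverse) = pvBlockedB m i j :=
    fun j hj => pvScanA_eq_blocked m hpre i j (List.mem_range.mp hi) (List.mem_range.mp hj)
  rw [List.filter_congr h]

-- ---- B side ----

lemma pvInnerB (i : Nat) (l : List Int) :
    ∀ (k : Nat) (cm : PySem.Dict Nat Int) (res : List (List Int)),
      ((l.zipIdx k).foldl (pvStepB i) (cm, res)).2
        = res ++ (((l.zipIdx k).filter (fun q => pvQ cm q.2 q.1)).map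
            (fun q => [(i : Int), (q.2 : Int)]))
      ∧ ∀ (j : Nat) (h0 : Int),
          pvQ ((l.zipIdx k).foldl (pvStepB i) (cm, res)).1 j h0 = true ↔
            (pvQ cm j h0 = true ∨ ∃ q ∈ l.zipIdx k, q.2 = j ∧ h0 ≤ q.1) := by
  induction l with
  | nil =>
      intro k cm res
      simp [List.zipIdx_nil]
  | cons h tl ih =>
      intro k cm res
      rw [List.zipIdx_cons]
      simp only [List.foldl_cons]
      have hstep : pvStepB i (cm, res) (h, k) =
          (cm.insert k (max (cm.getD k h) h),
           res ++ (if pvQ cm k h then [[(i : Int), (k : Int)]] else [])) := by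
        simp only [pvStepB, pvQ]
        by_cases hb : (cm.contains k && decide (h ≤ cm.getD k 0)) = true <;> simp [hb]
      rw [hstep]
      obtain ⟨hres, hq⟩ := ih (k + 1) (cm.insert k (max (cm.getD k h) h))
        (res ++ (if pvQ cm k h then [[(i : Int), (k : Int)]] else []))
      have hne : ∀ q ∈ tl.zipIdx (k + 1), q.2 ≠ k := by
        rintro ⟨x, j⟩ hqm
        have := (List.mem_zipIdx hqm).1
        omega
      have hQeq : ∀ q ∈ tl.zipIdx (k + 1),
          pvQ (cm.insert k (max (cm.getD k h) h)) q.2 q.1 = pvQ cm q.2 q.1 := by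
        intro q hqm
        have hne' := hne q hqm
        have hb : (q.2 == k) = false := beq_eq_false_iff_ne.mpr hne'
        simp only [pvQ, PySem.Dict.contains_insert, PySem.Dict.getD_insert]
        simp [hb, hne']
      refine ⟨?_, ?_⟩
      · rw [hres, List.filter_congr hQeq, List.filter_cons, List.append_assoc]
        by_cases hk : pvQ cm k h = true <;> simp [hk]
      · intro j h0
        rw [hq j h0]
        have hhead : pvQ (cm.insert k (max (cm.getD k h) h)) j h0 = true ↔
            (pvQ cm j h0 = true ∨ (k = j ∧ h0 ≤ h)) := by
          by_cases hk : j = k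
          · subst hk
            simp only [pvQ, PySem.Dict.contains_insert, PySem.Dict.getD_insert,
              beq_self_eq_true, Bool.true_or, Bool.true_and]
            cases hc : cm.contains j with
            | false =>
                rw [PySem.Dict.getD_of_not_contains _ _ hc,
                  PySem.Dict.getD_of_not_contains _ _ hc]
                simp
            | true =>
                have hs : (cm.get? j).isSome := by
                  rw [← PySem.Dict.contains_eq_isSome_get?, hc]
                obtain ⟨m, hm⟩ := Option.isSome_iff_exists.mp hs
                rw [PySem.Dict.getD_of_get?_eq_some _ _ hm,
                  PySem.Dict.getD_of_get?_eq_some _ _ hm]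
                simp
          · have hb : (j == k) = false := beq_eq_false_iff_ne.mpr hk
            simp only [pvQ, PySem.Dict.contains_insert, PySem.Dict.getD_insert,
              if_neg hk, hb, Bool.false_or]
            have : ¬ (k = j) := fun hh => hk hh.symm
            tauto
        rw [hhead]
        constructor
        · rintro (((hc | ⟨hkj, hh⟩) | ⟨q, hqm, hx⟩))
          · exact Or.inl hc
          · exact Or.inr ⟨(h, k), List.mem_cons_self .., hkj, hh⟩
          · exact Or.inr ⟨q, List.mem_cons_of_mem _ hqm, hx⟩
        · rintro (hc | ⟨q, hqm, hx⟩)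
          · exact Or.inl (Or.inl hc)
          · rcases List.mem_cons.mp hqm with rfl | hqm
            · exact Or.inl (Or.inr hx)
            · exact Or.inr ⟨q, hqm, hx⟩

lemma pvZipIdx_filter_map {β : Type} (l : List Int) (k : Nat)
    (p : Nat → Int → Bool) (f : Nat → β) :
    ((l.zipIdx k).filter (fun q => p q.2 q.1)).map (fun q => f q.2)
      = ((List.range l.length).filter (fun j => p (k + j) (l.getD j 0))).map
          (fun j => f (k + j)) := by
  induction l generalizing k with
  | nil => simp [List.zipIdx_nil]
  | cons a tl ih =>
      rw [List.zipIdx_cons]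
      simp only [List.length_cons, List.range_succ_eq_map, List.filter_cons,
        List.filter_map, Nat.add_zero, List.getD_cons_zero]
      have hfun1 : ((fun j => p (k + j) ((a :: tl).getD j 0)) ∘ Nat.succ)
          = (fun j => p (k + 1 + j) (tl.getD j 0)) := by
        funext j
        simp only [Function.comp_apply, Nat.succ_eq_add_one, List.getD_cons_succ]
        rw [show k + (j + 1) = k + 1 + j from by omega]
      have hfun2 : ((fun j => f (k + j)) ∘ Nat.succ) = (fun j => f (k + 1 + j)) := by
        funext j
        simp only [Function.comp_apply, Nat.succ_eq_add_one]
        rw [show k + (j + 1) = k + 1 + j from by omega]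
      by_cases hp : p k a = true <;>
        simp [hp, List.map_map, hfun2, ih (k + 1)] <;>
        refine congrArg _ (List.filter_congr fun j hj => ?_).symm <;>
        simp only [Function.comp_apply, Nat.succ_eq_add_one, List.getElem?_cons_succ] <;>
        rw [show k + (j + 1) = k + 1 + j from by omega]

lemma pvOuterB (m : List (List Int)) :
    ∀ (rest pref : List (List Int)) (cm : PySem.Dict Nat Int) (res : List (List Int)),
      m = pref ++ rest →
      (∀ (j : Nat) (h0 : Int), pvQ cm j h0 = true ↔
        ∃ t < pref.length, j < (m.getD t []).length ∧ h0 ≤ (m.getD t []).getD j 0) →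
      ((rest.zipIdx pref.length).foldl
          (fun st p => p.1.zipIdx.foldl (pvStepB p.2) st) (cm, res)).2
        = res ++ (List.range' pref.length rest.length).flatMap (fun i =>
            ((List.range (m.getD i []).length).filter (fun j => pvBlockedB m i j)).map
              (fun (j : Nat) => [(i : Int), (j : Int)])) := by
  intro rest
  induction rest with
  | nil =>
      intro pref cm res hm hinv
      simp [List.zipIdx_nil]
  | cons row tl ih =>
      intro pref cm res hm hinv
      rw [List.zipIdx_cons, List.foldl_cons]
      have hrow : m.getD pref.length [] = row := by
        rw [hm, List.getD_append_right _ _ _ _ (le_refl _)]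
        simp
      obtain ⟨hres, hq⟩ := pvInnerB pref.length row 0 cm res
      have hmemrow : ∀ (j : Nat) (h0 : Int),
          (∃ q ∈ row.zipIdx 0, q.2 = j ∧ h0 ≤ q.1) ↔
            (j < row.length ∧ h0 ≤ row.getD j 0) := by
        intro j h0
        constructor
        · rintro ⟨⟨x, jq⟩, hqm, rfl, hx⟩
          obtain ⟨hjl, hxe⟩ := List.mem_zipIdx' hqm
          refine ⟨hjl, ?_⟩
          rw [List.getD_eq_getElem?_getD, List.getElem?_eq_getElem hjl]
          simpa [← hxe] using hx
        · rintro ⟨hjl, hx⟩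
          refine ⟨(row[j], j), ?_, rfl, ?_⟩
          · apply List.mem_of_getElem? (i := j)
            rw [List.getElem?_zipIdx, List.getElem?_eq_getElem hjl]
            simp
          · rwa [List.getD_eq_getElem?_getD, List.getElem?_eq_getElem hjl] at hx
      have hinv' : ∀ (j : Nat) (h0 : Int),
          pvQ ((row.zipIdx 0).foldl (pvStepB pref.length) (cm, res)).1 j h0 = true ↔
            ∃ t < pref.length + 1, j < (m.getD t []).length ∧ h0 ≤ (m.getD t []).getD j 0 := by
        intro j h0
        rw [hq j h0, hinv j h0, hmemrow j h0]
        constructor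
        · rintro (⟨t, ht, hl, hv⟩ | ⟨hl, hv⟩)
          · exact ⟨t, by omega, hl, hv⟩
          · exact ⟨pref.length, by omega, by rwa [hrow], by rwa [hrow]⟩
        · rintro ⟨t, ht, hl, hv⟩
          rcases Nat.lt_succ_iff_lt_or_eq.mp ht with ht | rfl
          · exact Or.inl ⟨t, ht, hl, hv⟩
          · exact Or.inr ⟨by rwa [hrow] at hl, by rwa [hrow] at hv⟩
      have hm' : m = (pref ++ [row]) ++ tl := by
        rw [hm, List.append_assoc]; rfl
      have hstep := ih (pref ++ [row])
        ((row.zipIdx 0).foldl (pvStepB pref.length) (cm, res)).1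
        ((row.zipIdx 0).foldl (pvStepB pref.length) (cm, res)).2
        hm' (by simpa using hinv')
      simp only [List.length_append, List.length_cons, List.length_nil] at hstep
      rw [hstep, hres]
      -- the per-row output equals pvF's row i0 = pref.length
      have hX : ((row.zipIdx 0).filter (fun q => pvQ cm q.2 q.1)).map
            (fun q => [(pref.length : Int), (q.2 : Int)])
          = ((List.range (m.getD pref.length []).length).filter
              (fun j => pvBlockedB m pref.length j)).map
              (fun (j : Nat) => [(pref.length : Int), (j : Int)]) := by
        rw [pvZipIdx_filter_map row 0 (fun j h0 => pvQ cm j h0)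
          (fun j => [(pref.length : Int), (j : Int)])]
        simp only [Nat.zero_add, hrow]
        congr 1
        apply List.filter_congr
        intro j hj
        rw [Bool.eq_iff_iff, hinv j (row.getD j 0)]
        simp only [pvBlockedB, hrow, decide_eq_true_eq]
      rw [hX]
      simp only [List.length_cons, List.range'_succ, List.flatMap_cons, Nat.zero_add,
        List.append_assoc]

lemma pvB_eq_pvF (m : List (List Int)) :
    spectators_that_cant_see_alt m = pvF m := by
  unfold spectators_that_cant_see_alt pvF
  have h := pvOuterB m m [] PySem.Dict.empty []
    (by simp)
    (by intro j h0; simp [pvQ, PySem.Dict.contains_empty])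
  simpa [List.range_eq_range'] using h

theorem pv_main (m : List (List Int)) (hpre : Pre_spectators_that_cant_see m) :
    spectators_that_cant_see m = spectators_that_cant_see_alt m := by
  rw [pvA_eq_pvF m hpre, pvB_eq_pvF m]

-- ===== VERDICT (by name: the statement is the Claim_ definition above) =====
theorem spectators_that_cant_see_spec : Claim_equal_spectators_that_cant_see := by
  intro m _ hpre
  unfold Spec_spectators_that_cant_see
  exact pv_main m hpre
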